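-- pv_equiv track=rewrite | github.com/pypi-data/pypi-mirror-395 | packages/wistx-mcp/wistx_mcp-1.0.51.tar.gz/wistx_mcp-1.0.51/data_pipelines/processors/compliance_knowledge_processor.py | _infer_generic_services_from_providers
-- ===== SOURCE A (Python) =====
-- def _infer_generic_services_from_providers(
--     cloud_providers: list[str], content: str
-- ) -> list[str]:
--     """Infer generic services based on cloud providers and compliance requirements.
--
--     Uses provider-agnostic service categories when possible.
--     Falls back to provider-specific services only when providers are known.
--
--     Args:
--         cloud_providers: List of cloud providers (any provider)
--         content: Article content
--
--     Returns:
--         List of service names (generic or provider-specific)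
--     """
--     text = content.lower()
--     services = set()
--
--     provider_agnostic = "multi-cloud" in cloud_providers or len(cloud_providers) > 1
--
--     if provider_agnostic:
--         if "encryption" in text or "encrypt" in text or "key" in text:
--             services.add("key-management")
--         if "access" in text or "authentication" in text or "identity" in text:
--             services.add("identity-management")
--         if "monitoring" in text or "logging" in text or "audit" in text:
--             services.add("monitoring")
--         if "storage" in text or "data" in text:
--             services.add("object-storage")
--         if "database" in text or "data persistence" in text:
--             services.add("database")
--         if "network" in text or "security" in text:
--             services.add("networking")
--     else:
--         for provider in cloud_providers:
--             provider_lower = provider.lower()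
--
--             if provider_lower == "aws":
--                 if "encryption" in text or "encrypt" in text or "key" in text:
--                     services.add("kms")
--                     services.add("secrets-manager")
--                 if "access" in text or "authentication" in text or "identity" in text:
--                     services.add("iam")
--                 if "monitoring" in text or "logging" in text or "audit" in text:
--                     services.add("cloudwatch")
--                 if "storage" in text or "data" in text:
--                     services.add("s3")
--                 if "network" in text or "security" in text:
--                     services.add("vpc")
--
--             elif provider_lower == "gcp":
--                 if "encryption" in text or "encrypt" in text or "key" in text:
--                     services.add("cloud-kms")
--                 if "access" in text or "authentication" in text or "identity" in text:
--                     services.add("cloud-iam")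
--                 if "monitoring" in text or "logging" in text:
--                     services.add("cloud-monitoring")
--                 if "storage" in text or "data" in text:
--                     services.add("cloud-storage")
--
--             elif provider_lower == "azure":
--                 if "encryption" in text or "encrypt" in text or "key" in text:
--                     services.add("key-vault")
--                 if "access" in text or "authentication" in text or "identity" in text:
--                     services.add("azure-ad")
--                 if "monitoring" in text or "logging" in text:
--                     services.add("azure-monitor")
--                 if "storage" in text or "data" in text:
--                     services.add("blob-storage")
--
--             else:
--                 if "encryption" in text or "encrypt" in text or "key" in text:
--                     services.add("key-management")
--                 if "access" in text or "authentication" in text or "identity" in text: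
--                     services.add("identity-management")
--                 if "monitoring" in text or "logging" in text or "audit" in text:
--                     services.add("monitoring")
--                 if "storage" in text or "data" in text:
--                     services.add("object-storage")
--                 if "database" in text or "data persistence" in text:
--                     services.add("database")
--                 if "network" in text or "security" in text:
--                     services.add("networking")
--
--     return sorted(list(services))
-- ===== SOURCE B (Python) =====
-- _AGNOSTIC = [
--     ("crypto", ["key-management"]),
--     ("identity", ["identity-management"]),
--     ("mon_audit", ["monitoring"]),
--     ("storage", ["object-storage"]),
--     ("database", ["database"]),
--     ("network", ["networking"]),
-- ]
--
-- _TABLES = {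
--     "aws": [
--         ("crypto", ["kms", "secrets-manager"]),
--         ("identity", ["iam"]),
--         ("mon_audit", ["cloudwatch"]),
--         ("storage", ["s3"]),
--         ("network", ["vpc"]),
--     ],
--     "gcp": [
--         ("crypto", ["cloud-kms"]),
--         ("identity", ["cloud-iam"]),
--         ("mon", ["cloud-monitoring"]),
--         ("storage", ["cloud-storage"]),
--     ],
--     "azure": [
--         ("crypto", ["key-vault"]),
--         ("identity", ["azure-ad"]),
--         ("mon", ["azure-monitor"]),
--         ("storage", ["blob-storage"]),
--     ],
-- }
--
--
-- def _infer_generic_services_from_providers(cloud_providers, content):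
--     text = content.lower()
--     flags = {
--         "crypto": "encryption" in text or "encrypt" in text or "key" in text,
--         "identity": "access" in text or "authentication" in text or "identity" in text,
--         "mon": "monitoring" in text or "logging" in text,
--         "mon_audit": "monitoring" in text or "logging" in text or "audit" in text,
--         "storage": "storage" in text or "data" in text,
--         "database": "database" in text or "data persistence" in text,
--         "network": "network" in text or "security" in text,
--     }
--     if "multi-cloud" in cloud_providers or len(cloud_providers) > 1:
--         tables = [_AGNOSTIC]
--     else:
--         tables = [_TABLES.get(p.lower(), _AGNOSTIC) for p in cloud_providers]
--     services = set()
--     for table in tables: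
--         for cat, svcs in table:
--             if flags[cat]:
--                 services.update(svcs)
--     return sorted(services)
-- ===== Notes on version B (the rewrite author's own statement) =====
-- stated objective: idiomatic
-- what changed: Replaces A's four repeated per-provider if-chains by keyword-category flags computed once from the text plus data-driven per-provider lookup tables (category -> services) folded into the set.
import Mathlib
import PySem

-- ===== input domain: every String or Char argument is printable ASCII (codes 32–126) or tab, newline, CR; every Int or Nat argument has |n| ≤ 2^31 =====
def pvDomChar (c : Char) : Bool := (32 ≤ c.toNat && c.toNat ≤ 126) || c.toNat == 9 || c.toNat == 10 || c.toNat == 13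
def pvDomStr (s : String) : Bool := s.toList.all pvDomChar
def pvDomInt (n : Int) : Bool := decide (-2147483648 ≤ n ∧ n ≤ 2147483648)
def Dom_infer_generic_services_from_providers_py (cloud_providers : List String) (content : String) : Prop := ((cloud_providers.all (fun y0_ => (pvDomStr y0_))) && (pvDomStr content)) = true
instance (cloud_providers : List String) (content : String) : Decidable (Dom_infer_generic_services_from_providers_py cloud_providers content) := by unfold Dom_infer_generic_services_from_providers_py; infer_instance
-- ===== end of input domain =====

-- B replaces A's repeated per-provider if-chains by keyword flags computed once and
-- per-provider lookup tables folded into the set (objective: idiomatic; not faster).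

-- ===== PORT A =====
-- literal transliteration of A: set built by an if-chain (agnostic) or a loop over
-- providers with per-provider if-chains, then sorted.
def infer_generic_services_from_providers_py (cloud_providers : List String) (content : String) : List String :=
  let text := PySem.Str.lower content
  let services : PySem.Set String := PySem.Set.empty
  let provider_agnostic := cloud_providers.contains "multi-cloud" || cloud_providers.length > 1
  let services :=
    if provider_agnostic then
      let s := services
      let s := if PySem.Str.isIn "encryption" text || PySem.Str.isIn "encrypt" text || PySem.Str.isIn "key" text then PySem.Set.add s "key-management" else s
      let s := if PySem.Str.isIn "access" text || PySem.Str.isIn "authentication" text || PySem.Str.isIn "identity" text then PySem.Set.add s "identity-management" else s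
      let s := if PySem.Str.isIn "monitoring" text || PySem.Str.isIn "logging" text || PySem.Str.isIn "audit" text then PySem.Set.add s "monitoring" else s
      let s := if PySem.Str.isIn "storage" text || PySem.Str.isIn "data" text then PySem.Set.add s "object-storage" else s
      let s := if PySem.Str.isIn "database" text || PySem.Str.isIn "data persistence" text then PySem.Set.add s "database" else s
      let s := if PySem.Str.isIn "network" text || PySem.Str.isIn "security" text then PySem.Set.add s "networking" else s
      s
    else
      cloud_providers.foldl (fun s provider =>
        let provider_lower := PySem.Str.lower provider
        if provider_lower == "aws" then
          let s := if PySem.Str.isIn "encryption" text || PySem.Str.isIn "encrypt" text || PySem.Str.isIn "key" text then PySem.Set.add (PySem.Set.add s "kms") "secrets-manager" else s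
          let s := if PySem.Str.isIn "access" text || PySem.Str.isIn "authentication" text || PySem.Str.isIn "identity" text then PySem.Set.add s "iam" else s
          let s := if PySem.Str.isIn "monitoring" text || PySem.Str.isIn "logging" text || PySem.Str.isIn "audit" text then PySem.Set.add s "cloudwatch" else s
          let s := if PySem.Str.isIn "storage" text || PySem.Str.isIn "data" text then PySem.Set.add s "s3" else s
          let s := if PySem.Str.isIn "network" text || PySem.Str.isIn "security" text then PySem.Set.add s "vpc" else s
          s
        else if provider_lower == "gcp" then
          let s := if PySem.Str.isIn "encryption" text || PySem.Str.isIn "encrypt" text || PySem.Str.isIn "key" text then PySem.Set.add s "cloud-kms" else s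
          let s := if PySem.Str.isIn "access" text || PySem.Str.isIn "authentication" text || PySem.Str.isIn "identity" text then PySem.Set.add s "cloud-iam" else s
          let s := if PySem.Str.isIn "monitoring" text || PySem.Str.isIn "logging" text then PySem.Set.add s "cloud-monitoring" else s
          let s := if PySem.Str.isIn "storage" text || PySem.Str.isIn "data" text then PySem.Set.add s "cloud-storage" else s
          s
        else if provider_lower == "azure" then
          let s := if PySem.Str.isIn "encryption" text || PySem.Str.isIn "encrypt" text || PySem.Str.isIn "key" text then PySem.Set.add s "key-vault" else s
          let s := if PySem.Str.isIn "access" text || PySem.Str.isIn "authentication" text || PySem.Str.isIn "identity" text then PySem.Set.add s "azure-ad" else s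
          let s := if PySem.Str.isIn "monitoring" text || PySem.Str.isIn "logging" text then PySem.Set.add s "azure-monitor" else s
          let s := if PySem.Str.isIn "storage" text || PySem.Str.isIn "data" text then PySem.Set.add s "blob-storage" else s
          s
        else
          let s := if PySem.Str.isIn "encryption" text || PySem.Str.isIn "encrypt" text || PySem.Str.isIn "key" text then PySem.Set.add s "key-management" else s
          let s := if PySem.Str.isIn "access" text || PySem.Str.isIn "authentication" text || PySem.Str.isIn "identity" text then PySem.Set.add s "identity-management" else s
          let s := if PySem.Str.isIn "monitoring" text || PySem.Str.isIn "logging" text || PySem.Str.isIn "audit" text then PySem.Set.add s "monitoring" else s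
          let s := if PySem.Str.isIn "storage" text || PySem.Str.isIn "data" text then PySem.Set.add s "object-storage" else s
          let s := if PySem.Str.isIn "database" text || PySem.Str.isIn "data persistence" text then PySem.Set.add s "database" else s
          let s := if PySem.Str.isIn "network" text || PySem.Str.isIn "security" text then PySem.Set.add s "networking" else s
          s) services
  PySem.List.sorted services (fun x => x) false

-- ===== PORT B =====
-- categories of keyword flags (Source B's dict keys)
inductive PvCat where
  | crypto | identity | mon | monAudit | storage | database | network
  deriving DecidableEq, Repr

def pvAgnosticTable : List (PvCat × List String) :=
  [(PvCat.crypto, ["key-management"]),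
   (PvCat.identity, ["identity-management"]),
   (PvCat.monAudit, ["monitoring"]),
   (PvCat.storage, ["object-storage"]),
   (PvCat.database, ["database"]),
   (PvCat.network, ["networking"])]

-- _TABLES.get(p, _AGNOSTIC)
def pvTableFor (p : String) : List (PvCat × List String) :=
  if p == "aws" then
    [(PvCat.crypto, ["kms", "secrets-manager"]),
     (PvCat.identity, ["iam"]),
     (PvCat.monAudit, ["cloudwatch"]),
     (PvCat.storage, ["s3"]),
     (PvCat.network, ["vpc"])]
  else if p == "gcp" then
    [(PvCat.crypto, ["cloud-kms"]),
     (PvCat.identity, ["cloud-iam"]),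
     (PvCat.mon, ["cloud-monitoring"]),
     (PvCat.storage, ["cloud-storage"])]
  else if p == "azure" then
    [(PvCat.crypto, ["key-vault"]),
     (PvCat.identity, ["azure-ad"]),
     (PvCat.mon, ["azure-monitor"]),
     (PvCat.storage, ["blob-storage"])]
  else pvAgnosticTable

-- the flags dict, computed from text once
def pvFlags (text : String) : PvCat → Bool
  | PvCat.crypto => PySem.Str.isIn "encryption" text || PySem.Str.isIn "encrypt" text || PySem.Str.isIn "key" text
  | PvCat.identity => PySem.Str.isIn "access" text || PySem.Str.isIn "authentication" text || PySem.Str.isIn "identity" text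
  | PvCat.mon => PySem.Str.isIn "monitoring" text || PySem.Str.isIn "logging" text
  | PvCat.monAudit => PySem.Str.isIn "monitoring" text || PySem.Str.isIn "logging" text || PySem.Str.isIn "audit" text
  | PvCat.storage => PySem.Str.isIn "storage" text || PySem.Str.isIn "data" text
  | PvCat.database => PySem.Str.isIn "database" text || PySem.Str.isIn "data persistence" text
  | PvCat.network => PySem.Str.isIn "network" text || PySem.Str.isIn "security" text

-- apply one table: for (cat, svcs) in table: if flags[cat]: services.update(svcs)
def pvApplyTable (flags : PvCat → Bool) (s : PySem.Set String) (table : List (PvCat × List String)) : PySem.Set String :=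
  table.foldl (fun s e => if flags e.1 then PySem.Set.update s e.2 else s) s

def infer_generic_services_from_providers_py_alt (cloud_providers : List String) (content : String) : List String :=
  let text := PySem.Str.lower content
  let flags := pvFlags text
  let tables :=
    if cloud_providers.contains "multi-cloud" || cloud_providers.length > 1 then
      [pvAgnosticTable]
    else
      cloud_providers.map (fun p => pvTableFor (PySem.Str.lower p))
  let services := tables.foldl (pvApplyTable flags) PySem.Set.empty
  PySem.List.sorted services (fun x => x) false

-- ===== PRECONDITION & SPEC =====
def Spec_infer_generic_services_from_providers_py (cloud_providers : List String) (content : String) (out : List String) : Prop := out = infer_generic_services_from_providers_py_alt cloud_providers content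
instance (cloud_providers : List String) (content : String) (out : List String) : Decidable (Spec_infer_generic_services_from_providers_py cloud_providers content out) := by unfold Spec_infer_generic_services_from_providers_py; infer_instance

-- ===== CLAIM (what is proved, stated in full; the proofs are below) =====
def Claim_equal_infer_generic_services_from_providers_py : Prop := ∀ (cloud_providers : List String) (content : String), Dom_infer_generic_services_from_providers_py cloud_providers content → Spec_infer_generic_services_from_providers_py cloud_providers content (infer_generic_services_from_providers_py cloud_providers content)

-- ===== LEMMAS AND PROOFS =====

-- B's one-table step equals A's per-provider loop body, for any flag function f
theorem pvStep_eq (f : PvCat → Bool) (s : PySem.Set String) (q : String) :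
    pvApplyTable f s (pvTableFor q) =
      (if q == "aws" then
         let s := if f PvCat.crypto then PySem.Set.add (PySem.Set.add s "kms") "secrets-manager" else s
         let s := if f PvCat.identity then PySem.Set.add s "iam" else s
         let s := if f PvCat.monAudit then PySem.Set.add s "cloudwatch" else s
         let s := if f PvCat.storage then PySem.Set.add s "s3" else s
         let s := if f PvCat.network then PySem.Set.add s "vpc" else s
         s
       else if q == "gcp" then
         let s := if f PvCat.crypto then PySem.Set.add s "cloud-kms" else s
         let s := if f PvCat.identity then PySem.Set.add s "cloud-iam" else s
         let s := if f PvCat.mon then PySem.Set.add s "cloud-monitoring" else s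
         let s := if f PvCat.storage then PySem.Set.add s "cloud-storage" else s
         s
       else if q == "azure" then
         let s := if f PvCat.crypto then PySem.Set.add s "key-vault" else s
         let s := if f PvCat.identity then PySem.Set.add s "azure-ad" else s
         let s := if f PvCat.mon then PySem.Set.add s "azure-monitor" else s
         let s := if f PvCat.storage then PySem.Set.add s "blob-storage" else s
         s
       else
         let s := if f PvCat.crypto then PySem.Set.add s "key-management" else s
         let s := if f PvCat.identity then PySem.Set.add s "identity-management" else s
         let s := if f PvCat.monAudit then PySem.Set.add s "monitoring" else s
         let s := if f PvCat.storage then PySem.Set.add s "object-storage" else s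
         let s := if f PvCat.database then PySem.Set.add s "database" else s
         let s := if f PvCat.network then PySem.Set.add s "networking" else s
         s) := by
  by_cases h1 : q == "aws" <;> by_cases h2 : q == "gcp" <;> by_cases h3 : q == "azure" <;>
    simp only [pvApplyTable, pvTableFor, pvAgnosticTable, h1, h2, h3, if_true, if_false,
      Bool.false_eq_true, List.foldl_cons, List.foldl_nil,
      PySem.Set.update]

-- B's agnostic table applied to s equals A's agnostic if-chain, for any flag function f
theorem pvAgn_eq (f : PvCat → Bool) (s : PySem.Set String) :
    pvApplyTable f s pvAgnosticTable =
      (let s := if f PvCat.crypto then PySem.Set.add s "key-management" else s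
       let s := if f PvCat.identity then PySem.Set.add s "identity-management" else s
       let s := if f PvCat.monAudit then PySem.Set.add s "monitoring" else s
       let s := if f PvCat.storage then PySem.Set.add s "object-storage" else s
       let s := if f PvCat.database then PySem.Set.add s "database" else s
       let s := if f PvCat.network then PySem.Set.add s "networking" else s
       s) := by
  simp only [pvApplyTable, pvAgnosticTable, List.foldl_cons, List.foldl_nil, PySem.Set.update]

theorem infer_generic_services_from_providers_py_spec : Claim_equal_infer_generic_services_from_providers_py := by
  intro cloud_providers content _
  show _ = _
  unfold infer_generic_services_from_providers_py infer_generic_services_from_providers_py_alt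
  simp only []
  by_cases h : cloud_providers.contains "multi-cloud" || cloud_providers.length > 1
  · rw [if_pos h, if_pos h]
    refine congrArg (fun l => PySem.List.sorted l (fun x => x) false) ?_
    rw [List.foldl_cons, List.foldl_nil]
    have hstep := pvAgn_eq (pvFlags (PySem.Str.lower content)) PySem.Set.empty
    simp only [pvFlags] at hstep
    exact hstep.symm
  · rw [if_neg h, if_neg h]
    refine congrArg (fun l => PySem.List.sorted l (fun x => x) false) ?_
    rw [List.foldl_map]
    symm
    apply PySem.List.foldl_congr_mem
    intro s p hp
    have hstep := pvStep_eq (pvFlags (PySem.Str.lower content)) s (PySem.Str.lower p)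
    simp only [pvFlags] at hstep
    exact hstep
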